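-- pv_equiv track=rewrite | github.com/KeskiDev/what-other-words | scrabble.py | Get_potential_words
-- ===== SOURCE A (Python) =====
-- from itertools import product, permutations
--
-- def permutations_result(chars):
--     result = [''.join(element) for element in  list(permutations(chars))]
--     return result
--
-- def Get_potential_words(theWord):
--     possible_words = []
--     word_characters = ""
--     for letter in theWord:
--         word_characters = word_characters + letter
--         if(len(word_characters) > 1):
--             words = permutations_result(word_characters)
--             possible_words.extend(words)
--
--     return possible_words
-- ===== SOURCE B (Python) =====
-- def Get_potential_words(theWord):
--     possible_words = []
--     n = len(theWord)
--     for k in range(2, n + 1):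
--         # breadth-first expansion: states are (chosen, remaining pool) string pairs
--         states = [("", theWord[:k])]
--         for _ in range(k - 1):
--             states = [(chosen + pool[i], pool[:i] + pool[i + 1:])
--                       for chosen, pool in states
--                       for i in range(len(pool))]
--         # after k-1 rounds each pool holds exactly one character
--         possible_words.extend(chosen + pool for chosen, pool in states)
--     return possible_words
-- ===== Notes on version B (the rewrite author's own statement) =====
-- stated objective: alternative
-- what changed: Replaces the per-prefix itertools.permutations call (recursive depth-first generation plus a join of each leaf tuple) with an iterative breadth-first expansion: a worklist of (chosen, remaining-pool) states is expanded level by level, k times for the prefix of length k, so permutations are built incrementally and no recursion or tuple join is needed.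
import Mathlib
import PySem

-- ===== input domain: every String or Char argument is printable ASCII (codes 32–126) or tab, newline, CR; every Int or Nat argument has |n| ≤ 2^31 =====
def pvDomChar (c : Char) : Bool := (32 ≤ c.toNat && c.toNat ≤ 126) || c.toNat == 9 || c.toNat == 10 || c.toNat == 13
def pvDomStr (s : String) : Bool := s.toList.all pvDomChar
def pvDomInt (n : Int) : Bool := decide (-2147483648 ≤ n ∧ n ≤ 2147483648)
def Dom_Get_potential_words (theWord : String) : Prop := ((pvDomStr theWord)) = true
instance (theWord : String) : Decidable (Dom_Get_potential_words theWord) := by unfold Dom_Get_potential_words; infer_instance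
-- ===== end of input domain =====

-- B replaces the recursive itertools.permutations + join of each prefix with an iterative
-- breadth-first expansion of (chosen, pool) states; same cost, different decomposition.

-- ===== PORT A =====
-- ''.join over a tuple of characters is String.mk of the character list
def permutationsResult (chars : List Char) : List String :=
  (PySem.List.permutations chars chars.length).map (fun element => String.mk element)

-- loop body of A's for-loop over the letters (state: possible_words, word_characters)
def pvStepA (st : List String × List Char) (letter : Char) : List String × List Char :=
  let wc := st.2 ++ [letter]
  if wc.length > 1 then (st.1 ++ permutationsResult wc, wc) else (st.1, wc)

def Get_potential_words (theWord : String) : List String :=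
  (theWord.toList.foldl pvStepA ([], [])).1

-- ===== PORT B =====
-- one level of B's breadth-first expansion: each state (chosen, pool) branches on every pool index
def pvExpand (states : List (List Char × List Char)) : List (List Char × List Char) :=
  states.flatMap (fun st =>
    (List.range st.2.length).map (fun i => (st.1 ++ [st.2[i]!], st.2.eraseIdx i)))

-- python strings are transliterated as their character lists: theWord[:k] is take,
-- chosen + pool[i] is ++ [pool[i]], pool[:i] + pool[i+1:] is eraseIdx, chosen + pool is ++
def Get_potential_words_alt (theWord : String) : List String :=
  (PySem.List.pyRange 2 (PySem.Str.len theWord + 1)).foldl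
    (fun possible_words k =>
      let states := (List.range (k.toNat - 1)).foldl (fun st _ => pvExpand st)
        [(([] : List Char), theWord.toList.take k.toNat)]
      possible_words ++ states.map (fun st => String.mk (st.1 ++ st.2)))
    []

-- ===== PRECONDITION & SPEC =====
def Spec_Get_potential_words (theWord : String) (out : List String) : Prop := out = Get_potential_words_alt theWord
instance (theWord : String) (out : List String) : Decidable (Spec_Get_potential_words theWord out) := by unfold Spec_Get_potential_words; infer_instance

-- ===== CLAIM (what is proved, stated in full; the proofs are below) =====
def Claim_equal_Get_potential_words : Prop := ∀ (theWord : String), Dom_Get_potential_words theWord → Spec_Get_potential_words theWord (Get_potential_words theWord)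

-- ===== LEMMAS AND PROOFS =====

def pvIterN : Nat → List (List Char × List Char) → List (List Char × List Char)
  | 0, s => s
  | r + 1, s => pvIterN r (pvExpand s)

theorem foldl_range_expand (r : Nat) (s : List (List Char × List Char)) :
    (List.range r).foldl (fun st _ => pvExpand st) s = pvIterN r s := by
  induction r generalizing s with
  | zero => simp [pvIterN]
  | succ r ih =>
    rw [List.range_succ_eq_map]
    simp only [List.foldl_cons, List.foldl_map]
    exact ih (pvExpand s)

theorem pvExpand_append (s t : List (List Char × List Char)) :
    pvExpand (s ++ t) = pvExpand s ++ pvExpand t := by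
  simp [pvExpand]

theorem pvIterN_append (r : Nat) (s t : List (List Char × List Char)) :
    pvIterN r (s ++ t) = pvIterN r s ++ pvIterN r t := by
  induction r generalizing s t with
  | zero => simp [pvIterN]
  | succ r ih => simp [pvIterN, pvExpand_append, ih]

theorem pvIterN_flat (r : Nat) (l : List (List Char × List Char)) :
    pvIterN r l = l.flatMap (fun st => pvIterN r [st]) := by
  induction l with
  | nil =>
    have : pvIterN r [] = [] := by
      induction r with
      | zero => simp [pvIterN]
      | succ r ih => simpa [pvIterN, pvExpand] using ih
    simp [this]
  | cons a l ih =>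
    have : a :: l = [a] ++ l := rfl
    rw [this, pvIterN_append, ih]
    simp

theorem iterN_fst (r : Nat) (p xs : List Char) :
    (pvIterN r [(p, xs)]).map Prod.fst
      = (PySem.List.permutations xs r).map (fun q => p ++ q) := by
  induction r generalizing p xs with
  | zero => simp [pvIterN, PySem.List.permutations]
  | succ r ih =>
    rw [show pvIterN (r + 1) [(p, xs)] = pvIterN r (pvExpand [(p, xs)]) from rfl]
    rw [show pvExpand [(p, xs)]
        = (List.range xs.length).map (fun i => (p ++ [xs[i]!], xs.eraseIdx i)) by
      simp [pvExpand]]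
    rw [pvIterN_flat, List.flatMap_map, List.map_flatMap]
    rw [show PySem.List.permutations xs (r + 1)
        = (List.range xs.length).flatMap (fun i =>
            match xs[i]? with
            | none => []
            | some x => (PySem.List.permutations (xs.eraseIdx i) r).map (fun q => x :: q)) by
      rw [PySem.List.permutations]
      refine List.flatMap_congr (fun i _ => ?_)
      rcases hx : xs[i]? with _ | x <;> simp]
    rw [List.map_flatMap]
    refine List.flatMap_congr (fun i hi => ?_)
    have hlt : i < xs.length := List.mem_range.mp hi
    rw [List.getElem?_eq_getElem hlt, getElem!_pos xs i hlt]
    rw [ih]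
    simp

def pvG (wc : List Char) : List Char → List String
  | [] => []
  | c :: l => (if (wc ++ [c]).length > 1 then permutationsResult (wc ++ [c]) else []) ++ pvG (wc ++ [c]) l

theorem foldA (l : List Char) (acc : List String) (wc : List Char) :
    (l.foldl pvStepA (acc, wc)).1 = acc ++ pvG wc l := by
  induction l generalizing acc wc with
  | nil => simp [pvG]
  | cons c l ih =>
    simp only [List.foldl_cons, pvStepA, pvG]
    split_ifs with h <;> simp [ih]

theorem pvG_eq (l wc : List Char) :
    pvG wc l = (List.range' (wc.length + 1) l.length).flatMap
      (fun k => if 1 < k then permutationsResult ((wc ++ l).take k) else []) := by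
  induction l generalizing wc with
  | nil => simp [pvG]
  | cons c l ih =>
    rw [pvG, List.length_cons, List.range'_succ, List.flatMap_cons]
    have htake : (wc ++ c :: l).take (wc.length + 1) = wc ++ [c] := by
      have : wc ++ c :: l = (wc ++ [c]) ++ l := by simp
      rw [this]
      have hlen : wc.length + 1 = (wc ++ [c]).length := by simp
      rw [hlen, List.take_left]
    rw [htake]
    have hrw : wc ++ c :: l = (wc ++ [c]) ++ l := by simp
    rw [hrw, ih (wc ++ [c])]
    have hlen2 : (wc ++ [c]).length + 1 = wc.length + 1 + 1 := by simp
    rw [hlen2]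
    congr 1
    · by_cases h : 1 < wc.length + 1 <;> simp [h]

theorem pyRange_nat (a n : Nat) :
    PySem.List.pyRange a (a + n) = (List.range' a n).map (Nat.cast : Nat → Int) := by
  induction n generalizing a with
  | zero =>
    simp [PySem.List.pyRange]
  | succ n ih =>
    have hlt : (a : Int) < (a : Int) + (n + 1 : Nat) := by push_cast; omega
    rw [PySem.List.pyRange_one_cons hlt]
    have : ((a : Int) + 1) = ((a + 1 : Nat) : Int) := by push_cast; ring
    rw [this]
    have harg : ((a : Int) + ((n + 1 : Nat) : Int)) = (((a + 1) : Nat) : Int) + (n : Int) := by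
      push_cast; ring
    rw [harg, show ((n : Int)) = ((n : Nat) : Int) from rfl, ih (a + 1)]
    simp [List.range'_succ]

theorem pool_len_expand (s : List (List Char × List Char)) (L : Nat)
    (h : ∀ st ∈ s, st.2.length = L + 1) :
    ∀ st ∈ pvExpand s, st.2.length = L := by
  intro st hst
  rw [pvExpand, List.mem_flatMap] at hst
  obtain ⟨st0, h0, hmem⟩ := hst
  rw [List.mem_map] at hmem
  obtain ⟨i, hi, rfl⟩ := hmem
  have hlt : i < st0.2.length := List.mem_range.mp hi
  simp only [List.length_eraseIdx_of_lt hlt, h st0 h0]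
  omega

theorem pool_len_iter (r : Nat) :
    ∀ (s : List (List Char × List Char)) (L : Nat), (∀ st ∈ s, st.2.length = r + L) →
    ∀ st ∈ pvIterN r s, st.2.length = L := by
  induction r with
  | zero => intro s L h st hst; have := h st hst; simpa using this
  | succ r ih =>
    intro s L h st hst
    refine ih (pvExpand s) L (pool_len_expand s (r + L) (fun st0 h0 => ?_)) st hst
    rw [h st0 h0]; omega

theorem expand_fst_singleton (s : List (List Char × List Char))
    (h : ∀ st ∈ s, st.2.length = 1) :
    (pvExpand s).map Prod.fst = s.map (fun st => st.1 ++ st.2) := by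
  induction s with
  | nil => simp [pvExpand]
  | cons a s ih =>
    obtain ⟨x, hx⟩ := List.length_eq_one_iff.mp (h a (by simp))
    have hrest : ∀ st ∈ s, st.2.length = 1 := fun st hst => h st (by simp [hst])
    rw [show a :: s = [a] ++ s from rfl, pvExpand_append, List.map_append, ih hrest]
    simp [pvExpand, hx]

theorem iter_expand_comm (r : Nat) (s : List (List Char × List Char)) :
    pvIterN r (pvExpand s) = pvExpand (pvIterN r s) := by
  induction r generalizing s with
  | zero => simp [pvIterN]
  | succ r ih => exact ih (pvExpand s)

theorem bodyB_eq (w : String) (k : Nat) (hk : 2 ≤ k) (hn : k ≤ w.toList.length) :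
    ((List.range (k - 1)).foldl (fun st _ => pvExpand st)
        [(([] : List Char), w.toList.take k)]).map (fun st => String.mk (st.1 ++ st.2))
      = permutationsResult (w.toList.take k) := by
  rw [foldl_range_expand]
  have hlen : (w.toList.take k).length = k := by
    rw [List.length_take]; omega
  have hsing : ∀ st ∈ pvIterN (k - 1) [(([] : List Char), w.toList.take k)],
      st.2.length = 1 := by
    refine pool_len_iter (k - 1) _ 1 (fun st hst => ?_)
    rw [List.mem_singleton] at hst
    subst hst
    simp only [hlen]; omega
  have h1 : (pvIterN (k - 1) [(([] : List Char), w.toList.take k)]).map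
        (fun st => String.mk (st.1 ++ st.2))
      = ((pvIterN (k - 1) [(([] : List Char), w.toList.take k)]).map
          (fun st => st.1 ++ st.2)).map String.mk := by
    simp
  rw [h1, ← expand_fst_singleton _ hsing, ← iter_expand_comm]
  have h2 : ∀ (xs : List Char), pvIterN (k - 1) (pvExpand [(([] : List Char), xs)])
      = pvIterN k [(([] : List Char), xs)] := by
    intro xs
    have hh : k - 1 + 1 = k := by omega
    conv_rhs => rw [← hh]
    rfl
  rw [h2]
  rw [iterN_fst]
  rw [permutationsResult, ← hlen]
  simp

theorem main_eq (w : String) : Get_potential_words w = Get_potential_words_alt w := by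
  have hlen : PySem.Str.len w = (w.toList.length : Int) := by
    simp [PySem.Str.len]
  rw [Get_potential_words, Get_potential_words_alt, foldA, pvG_eq]
  rw [PySem.List.foldl_append_eq_flatMap]
  simp only [List.nil_append, List.length_nil, Nat.zero_add, hlen]
  -- both sides as flatMap over ranges of prefix lengths
  cases hn : w.toList.length with
  | zero =>
    simp [PySem.List.pyRange]
  | succ m =>
    rw [List.range'_succ, List.flatMap_cons]
    simp only [show ¬ (1 < 1) by omega, if_false, List.nil_append]
    have h2 : ((m + 1 : Nat) : Int) + 1 = ((2 : Nat) : Int) + ((m : Nat) : Int) := by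
      push_cast; ring
    have htwo : (2 : Int) = ((2 : Nat) : Int) := by norm_num
    rw [h2, htwo, pyRange_nat 2 m]
    rw [show (1 : Nat) + 1 = 2 from rfl]
    simp only [List.flatMap_map]
    refine List.flatMap_congr (fun k hk => ?_)
    have hmem := List.mem_range'.mp hk
    have hk2 : 2 ≤ k := by omega
    have hkn : k ≤ w.toList.length := by omega
    have htn : ((k : Int)).toNat = k := by simp
    simp only [htn]
    rw [bodyB_eq w k hk2 hkn]
    simp [show 1 < k by omega]

-- ===== VERDICT (by name: the statement is the Claim_ definition above) =====
theorem Get_potential_words_spec : Claim_equal_Get_potential_words := by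
  intro w _
  exact main_eq w
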